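-- pv_equiv track=rewrite | github.com/oussama-aouini/scoring-script | scoring_functions.py | count_words_from_list
-- ===== SOURCE A (Python) =====
-- def count_words_from_list(text, word_list):
--     """
--     Counts the number of words from the given word list in the text.
--
--     Args:
--         text: The text to search in.
--         word_list: The list of words to search for.
--
--     Returns:
--         The count of words found in the text.
--     """
--     count = 0
--     found_words = set()
--     for word in word_list:
--         if word.lower() in text.lower() and word.lower() not in found_words:
--             count += 1
--             found_words.add(word.lower())
--     return count
-- ===== SOURCE B (Python) =====
-- def count_words_from_list(text, word_list):
--     """Length-bucketed window hashing: for each distinct pattern length L,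
--     hash every length-L window of the (lowercased) text into a set once,
--     then answer each distinct lowercased pattern by a single set lookup."""
--     t = text.lower()
--     patterns = {w.lower() for w in word_list}
--     windows = {}
--     for L in {len(w) for w in patterns}:
--         windows[L] = {t[i:i+L] for i in range(len(t) - L + 1)}
--     return sum(1 for w in patterns if w in windows[len(w)])
-- ===== Notes on version B (the rewrite author's own statement) =====
-- stated objective: faster
-- what changed: A runs a substring search over the whole text for every word; B hashes all length-L windows of the text into a set once per distinct pattern length and answers each deduplicated lowercased pattern by one set lookup.
import Mathlib
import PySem

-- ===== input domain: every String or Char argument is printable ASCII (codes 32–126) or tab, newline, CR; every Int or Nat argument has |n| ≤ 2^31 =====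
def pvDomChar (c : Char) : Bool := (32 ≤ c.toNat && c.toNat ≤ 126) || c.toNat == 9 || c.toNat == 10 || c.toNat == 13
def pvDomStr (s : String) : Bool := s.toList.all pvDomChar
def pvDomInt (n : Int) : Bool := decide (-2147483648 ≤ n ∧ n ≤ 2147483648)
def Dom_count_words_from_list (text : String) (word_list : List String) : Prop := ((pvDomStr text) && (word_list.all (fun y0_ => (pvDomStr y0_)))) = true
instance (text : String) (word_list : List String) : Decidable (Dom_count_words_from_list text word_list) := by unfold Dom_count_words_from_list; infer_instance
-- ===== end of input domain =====

-- B replaces A's per-word substring searches by hashing the text's length-L windows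
-- once per distinct pattern length and answering each pattern by one set lookup.

-- ===== PORT A =====
-- A: loop over word_list, re-lowercasing, with a found-words set and a counter.
def count_words_from_list (text : String) (word_list : List String) : Int :=
  (word_list.foldl
    (fun (st : Int × PySem.Set String) word =>
      if PySem.Str.isIn (PySem.Str.lower word) (PySem.Str.lower text)
          && !(PySem.Set.contains st.2 (PySem.Str.lower word))
      then (st.1 + 1, PySem.Set.add st.2 (PySem.Str.lower word))
      else st)
    ((0 : Int), PySem.Set.empty)).1

-- ===== PORT B =====
-- Source B's '{t[i:i+L] for i in range(len(t)-L+1)}': the set of length-L windows of t.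
def cwflWindows (t : List Char) (L : Nat) : PySem.Set (List Char) :=
  PySem.Set.ofList
    ((PySem.List.pyRange 0 ((t.length : Int) - (L : Int) + 1) 1).map
      (fun i => PySem.Chars.slice t (some i) (some (i + (L : Int)))))

-- B: lowercase once, dedupe lowered patterns, bucket by length, hash windows, look up.
-- (len(w) is a non-negative Python int; it is ported as Nat dictionary keys.)
def count_words_from_list_alt (text : String) (word_list : List String) : Int :=
  let t := (PySem.Str.lower text).toList
  let patterns : PySem.Set (List Char) :=
    PySem.Set.ofList (word_list.map (fun w => (PySem.Str.lower w).toList))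
  let lengths : PySem.Set Nat := PySem.Set.ofList (patterns.map (fun w => w.length))
  let windows : PySem.Dict Nat (PySem.Set (List Char)) :=
    lengths.foldl (fun d L => d.insert L (cwflWindows t L)) PySem.Dict.empty
  patterns.foldl
    (fun (c : Int) w =>
      if PySem.Set.contains (windows.getD w.length PySem.Set.empty) w then c + 1 else c)
    0

-- ===== PRECONDITION & SPEC =====
def Spec_count_words_from_list (text : String) (word_list : List String) (out : Int) : Prop := out = count_words_from_list_alt text word_list
instance (text : String) (word_list : List String) (out : Int) : Decidable (Spec_count_words_from_list text word_list out) := by unfold Spec_count_words_from_list; infer_instance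

-- ===== CLAIM (what is proved, stated in full; the proofs are below) =====
def Claim_equal_count_words_from_list : Prop := ∀ (text : String) (word_list : List String), Dom_count_words_from_list text word_list → Spec_count_words_from_list text word_list (count_words_from_list text word_list)

-- ===== LEMMAS AND PROOFS =====

-- Loop invariant for A: starting from (c, s), the final count is c plus the number of
-- distinct lowered words that pass the substring test and are not already in s.
theorem cwfl_loop (text : String) (l : List String) (c : Int) (s : PySem.Set String) :
    (l.foldl
      (fun (st : Int × PySem.Set String) word =>
        if PySem.Str.isIn (PySem.Str.lower word) (PySem.Str.lower text)
            && !(PySem.Set.contains st.2 (PySem.Str.lower word))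
        then (st.1 + 1, PySem.Set.add st.2 (PySem.Str.lower word))
        else st)
      (c, s)).1
    = c + (((PySem.Set.ofList (l.map PySem.Str.lower)).filter
        (fun w => PySem.Str.isIn w (PySem.Str.lower text)
          && !(PySem.Set.contains s w))).length : Int) := by
  induction l generalizing c s with
  | nil => simp [PySem.Set.ofList_nil]
  | cons w rest ih =>
    simp only [List.foldl_cons, List.map_cons, PySem.Set.ofList_cons]
    by_cases hp : PySem.Str.isIn (PySem.Str.lower w) (PySem.Str.lower text) = true
    · by_cases hmem : PySem.Str.lower w ∈ s
      · have hc : PySem.Set.contains s (PySem.Str.lower w) = true :=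
          (PySem.Set.contains_iff s _).mpr hmem
        rw [if_neg (by rw [hc]; simp), ih]
        congr 2
        simp only [List.filter_cons, hp, hc, Bool.not_true, Bool.and_false,
          Bool.false_eq_true, if_false, PySem.Set.discard, List.filter_filter]
        refine congrArg List.length (List.filter_congr ?_)
        intro y _
        by_cases hy : y = PySem.Str.lower w
        · subst hy; rw [hc]; simp
        · simp [hy]
      · have hc : PySem.Set.contains s (PySem.Str.lower w) = false := by
          simp [PySem.Set.contains_eq_listContains, List.contains_eq_mem, hmem]
        rw [if_pos (by rw [hp, hc]; simp), ih, PySem.Set.add_of_not_mem hmem]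
        simp only [List.filter_cons, hp, hc, Bool.not_false, Bool.and_true,
          if_pos, PySem.Set.discard, List.filter_filter]
        have heq : List.filter
            (fun w_1 => PySem.Str.isIn w_1 (PySem.Str.lower text)
              && !(PySem.Set.contains (s ++ [PySem.Str.lower w]) w_1))
            (PySem.Set.ofList (rest.map PySem.Str.lower))
          = List.filter
            (fun a => (PySem.Str.isIn a (PySem.Str.lower text)
              && !(PySem.Set.contains s a)) && !(a == PySem.Str.lower w))
            (PySem.Set.ofList (rest.map PySem.Str.lower)) := by
          apply List.filter_congr
          intro y _
          simp only [PySem.Set.contains_eq_listContains, List.contains_eq_mem,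
            List.mem_append, List.mem_singleton]
          by_cases hy : y = PySem.Str.lower w <;> simp [hy]
        rw [heq]
        simp only [List.length_cons]
        push_cast
        ring
    · rw [if_neg (by rw [Bool.eq_false_iff.mpr hp]; simp), ih]
      congr 2
      have hpf : PySem.Str.isIn (PySem.Str.lower w) (PySem.Str.lower text) = false :=
        Bool.eq_false_iff.mpr hp
      simp only [List.filter_cons, hpf, Bool.false_and,
        Bool.false_eq_true, if_false, PySem.Set.discard, List.filter_filter]
      refine congrArg List.length (List.filter_congr ?_)
      intro y _
      by_cases hy : y = PySem.Str.lower w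
      · subst hy; rw [hpf]; simp
      · simp [hy]

-- sum(1 for w in l if p(w)) as a fold equals the filtered length
theorem foldl_count_if {α : Type} (l : List α) (p : α → Bool) (c : Int) :
    l.foldl (fun (c : Int) w => if p w then c + 1 else c) c
      = c + ((l.filter p).length : Int) := by
  induction l generalizing c with
  | nil => simp
  | cons a l ih =>
    by_cases hp : p a = true
    · simp only [List.foldl_cons, List.filter_cons, hp, if_true, List.length_cons]
      rw [ih]
      push_cast
      ring
    · have hp' : p a = false := Bool.eq_false_iff.mpr hp
      simp only [List.foldl_cons, List.filter_cons, hp', Bool.false_eq_true, if_false]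
      exact ih c

-- a dict built by inserting f L at every key L of ks answers f k on every k ∈ ks
theorem getD_foldl_insert_fn {ν : Type} (ks : List Nat) (f : Nat → ν)
    (d0 : PySem.Dict Nat ν) (k : Nat) (dflt : ν) :
    (ks.foldl (fun d L => d.insert L (f L)) d0).getD k dflt
      = if k ∈ ks then f k else d0.getD k dflt := by
  induction ks generalizing d0 with
  | nil => simp
  | cons L rest ih =>
    rw [List.foldl_cons, ih, PySem.Dict.getD_insert]
    by_cases hk : k ∈ rest
    · simp [hk]
    · by_cases hkL : k = L
      · subst hkL; simp [hk]
      · simp [hk, hkL]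

-- a length-|w| window of t equals w exactly when w occurs as a substring of t
theorem contains_windows (t w : List Char) :
    PySem.Set.contains (cwflWindows t w.length) w = PySem.Chars.isIn w t := by
  rw [Bool.eq_iff_iff, PySem.Set.contains_iff,
    ← PySem.Chars.exists_prefix_drop_iff_isIn]
  unfold cwflWindows
  rw [PySem.Set.mem_ofList _ _, List.mem_map]
  constructor
  · rintro ⟨i, hi, hslice⟩
    obtain ⟨h0i, _⟩ := (PySem.List.mem_pyRange_one).mp hi
    refine ⟨i.toNat, ?_⟩
    rw [PySem.Chars.slice_eq_listSlice,
      PySem.List.slice_toNat t h0i (by omega)] at hslice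
    rw [← hslice]
    exact List.take_prefix _ _
  · rintro ⟨j, hpre⟩
    have hlen : w.length ≤ t.length - j := by
      have := hpre.length_le
      simpa using this
    by_cases hj : j ≤ t.length - w.length ∧ w.length ≤ t.length
    · refine ⟨(j : Int), ?_, ?_⟩
      · apply (PySem.List.mem_pyRange_one).mpr
        constructor
        · omega
        · omega
      · rw [PySem.Chars.slice_eq_listSlice,
          PySem.List.slice_toNat t (by omega) (by omega)]
        have h1 : ((j : Int)).toNat = j := by omega
        have h2 : ((j : Int) + (w.length : Int)).toNat = j + w.length := by omega
        rw [h1, h2]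
        have h3 : j + w.length - j = w.length := by omega
        rw [h3]
        exact (List.prefix_iff_eq_take.mp hpre).symm
    · -- only w = [] escapes the case above; the empty window at position 0 works
      have hw : w = [] := by
        refine List.length_eq_zero_iff.mp ?_
        omega
      subst hw
      refine ⟨0, ?_, ?_⟩
      · apply (PySem.List.mem_pyRange_one).mpr
        refine ⟨le_refl 0, ?_⟩
        simp only [List.length_nil, Nat.cast_zero]
        omega
      · rw [PySem.Chars.slice_eq_listSlice]
        simp [PySem.List.slice_to]

-- Set.ofList commutes with mapping an injective function
theorem ofList_map_toList (l : List String) :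
    PySem.Set.ofList (l.map String.toList) = (PySem.Set.ofList l).map String.toList := by
  have key : ∀ (l : List String) (s : PySem.Set String),
      List.foldl PySem.Set.add (s.map String.toList) (l.map String.toList)
        = (List.foldl PySem.Set.add s l).map String.toList := by
    intro l
    induction l with
    | nil => intro s; simp
    | cons a l ih =>
      intro s
      simp only [List.map_cons, List.foldl_cons]
      have htl : ∀ {b : String}, b.toList = a.toList → b = a := by
        intro b h
        have h2 := congrArg String.ofList h
        simpa using h2
      have hadd : PySem.Set.add (s.map String.toList) a.toList
          = (PySem.Set.add s a).map String.toList := by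
        by_cases hmem : a ∈ s
        · rw [PySem.Set.add_of_mem hmem,
            PySem.Set.add_of_mem (List.mem_map.mpr ⟨a, hmem, rfl⟩)]
        · have hmem2 : a.toList ∉ s.map String.toList := by
            intro h
            obtain ⟨b, hb, hbe⟩ := List.mem_map.mp h
            exact hmem (htl hbe ▸ hb)
          rw [PySem.Set.add_of_not_mem hmem, PySem.Set.add_of_not_mem hmem2,
            List.map_append]
          simp
      rw [hadd, ih]
  have := key l PySem.Set.empty
  simpa [PySem.Set.ofList_eq_foldl, PySem.Set.empty] using this

-- ===== VERDICT (by name: the statement is the Claim_ definition above) =====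
theorem count_words_from_list_spec : Claim_equal_count_words_from_list := by
  intro text word_list _
  unfold Spec_count_words_from_list count_words_from_list count_words_from_list_alt
  rw [cwfl_loop, foldl_count_if]
  have hmap : word_list.map (fun w => (PySem.Str.lower w).toList)
      = (word_list.map PySem.Str.lower).map String.toList := by
    simp [List.map_map]
  rw [hmap, ofList_map_toList, List.filter_map, List.length_map]
  congr 1
  congr 1
  refine congrArg List.length (List.filter_congr ?_)
  intro y hy
  have hempty : PySem.Set.contains (PySem.Set.empty : PySem.Set String) y = false := by
    simp [PySem.Set.contains_eq_listContains, PySem.Set.empty]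
  rw [hempty]
  simp only [Bool.not_false, Bool.and_true, Function.comp]
  have hmem : y.toList.length ∈ PySem.Set.ofList
      (((PySem.Set.ofList (word_list.map PySem.Str.lower)).map String.toList).map
        (fun w => w.length)) :=
    (PySem.Set.mem_ofList _ _).mpr
      (List.mem_map.mpr ⟨y.toList, List.mem_map.mpr ⟨y, hy, rfl⟩, rfl⟩)
  rw [getD_foldl_insert_fn, if_pos hmem, contains_windows, PySem.Str.isIn_eq]
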